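-- pv_equiv track=rewrite | github.com/edersonff/IQ-Option | excel.py | charac
-- ===== SOURCE A (Python) =====
-- def charac(word):
--     wordConveted = ""
--     invertedWord = word[::-1]
--
--     numeric = -1
--     for i, charac in enumerate(invertedWord):
--         if i-1 == numeric:
--             if charac == "Z":
--                 if(i == len(invertedWord)-1):
--                     wordConveted += "A"
--                 numeric = i
--                 wordConveted += chr( ord(charac)-25 )
--             else:
--                 wordConveted += chr( ord(charac) + 1 )
--         else:
--             wordConveted += charac
--
--
--     return wordConveted[::-1]
-- ===== SOURCE B (Python) =====
-- def charac(word):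
--     stripped = word.rstrip('Z')
--     k = len(word) - len(stripped)
--     if not stripped:
--         return 'A' * (len(word) + 1) if word else ''
--     return stripped[:-1] + chr(ord(stripped[-1]) + 1) + 'A' * k
-- ===== Notes on version B (the rewrite author's own statement) =====
-- stated objective: simpler
-- what changed: Replaces the reversed enumerate loop with index/carry state by a direct decomposition: strip the trailing run of the carry letter, bump the last remaining character, and append that many reset letters; also avoids A's quadratic repeated string concatenation.
import Mathlib
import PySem

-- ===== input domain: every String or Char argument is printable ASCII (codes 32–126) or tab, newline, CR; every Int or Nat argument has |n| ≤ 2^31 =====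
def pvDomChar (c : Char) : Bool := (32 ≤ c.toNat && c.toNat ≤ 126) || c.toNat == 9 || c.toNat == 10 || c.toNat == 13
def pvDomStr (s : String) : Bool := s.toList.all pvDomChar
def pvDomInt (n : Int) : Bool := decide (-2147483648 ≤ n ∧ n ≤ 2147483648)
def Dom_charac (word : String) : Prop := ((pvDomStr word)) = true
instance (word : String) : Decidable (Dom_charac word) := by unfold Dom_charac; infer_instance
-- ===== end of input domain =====

-- B replaces A's reversed enumerate loop (carry tracked via a 'numeric' index) by a direct
-- decomposition: strip the trailing 'Z' run, bump the last remaining char, append 'A's.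

-- ===== PORT A =====
-- the for-loop over enumerate(invertedWord), state: wordConveted (wc) and numeric
def characGo (len : Int) : List (Int × Char) → List Char → Int → List Char
  | [], wc, _ => wc
  | (i, c) :: rest, wc, numeric =>
    if i - 1 = numeric then
      if c = 'Z' then
        let wc := if i = len - 1 then wc ++ ['A'] else wc
        characGo len rest (wc ++ [Char.ofNat (c.toNat - 25)]) i
      else
        characGo len rest (wc ++ [Char.ofNat (c.toNat + 1)]) numeric
    else
      characGo len rest (wc ++ [c]) numeric

def charac (word : String) : String :=
  let invertedWord := word.toList.reverse
  String.mk (characGo invertedWord.length (PySem.List.enumerate invertedWord) [] (-1)).reverse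

-- ===== PORT B =====
def charac_alt (word : String) : String :=
  let l := word.toList
  let stripped := (l.reverse.dropWhile (· == 'Z')).reverse
  let k := l.length - stripped.length
  if stripped = [] then
    (if l = [] then "" else String.mk (List.replicate (l.length + 1) 'A'))
  else
    String.mk (stripped.dropLast ++ [Char.ofNat ((stripped.getLastD 'A').toNat + 1)]
               ++ List.replicate k 'A')

-- ===== PRECONDITION & SPEC =====
def Spec_charac (word : String) (out : String) : Prop := out = charac_alt word
instance (word : String) (out : String) : Decidable (Spec_charac word out) := by unfold Spec_charac; infer_instance

-- ===== CLAIM (what is proved, stated in full; the proofs are below) =====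
def Claim_equal_charac : Prop := ∀ (word : String), Dom_charac word → Spec_charac word (charac word)

-- ===== LEMMAS AND PROOFS =====

-- once numeric lags strictly behind i-1, the loop just copies the rest
theorem go_copy (len : Int) (rest : List Char) : ∀ (s : Int) (wc : List Char) (numeric : Int),
    numeric < s - 1 → characGo len (PySem.List.enumerate rest s) wc numeric = wc ++ rest := by
  induction rest with
  | nil => intro s wc numeric _; simp [PySem.List.enumerate, characGo]
  | cons c cs ih =>
    intro s wc numeric h
    rw [PySem.List.enumerate_cons, characGo]
    rw [if_neg (by omega)]
    rw [ih (s + 1) (wc ++ [c]) numeric (by omega)]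
    simp

-- carry arrives at a non-'Z' char: it is bumped, the rest is copied
theorem go_nonZ (len : Int) (c : Char) (hc : ¬ c = 'Z') (rest : List Char) (s : Int) (wc : List Char) :
    characGo len (PySem.List.enumerate (c :: rest) s) wc (s - 1)
      = wc ++ Char.ofNat (c.toNat + 1) :: rest := by
  rw [PySem.List.enumerate_cons, characGo, if_pos rfl, if_neg hc]
  rw [go_copy len rest (s + 1) _ (s - 1) (by omega)]
  simp

-- the carry runs through a 'Z'-run followed by a non-empty tail, writing 'A's
theorem go_zrun (len : Int) : ∀ (m : Nat) (t : List Char) (s : Int) (wc : List Char),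
    t ≠ [] → s + m + t.length = len →
    characGo len (PySem.List.enumerate (List.replicate m 'Z' ++ t) s) wc (s - 1)
      = characGo len (PySem.List.enumerate t (s + m)) (wc ++ List.replicate m 'A') (s + m - 1) := by
  intro m
  induction m with
  | zero => intro t s wc _ _; simp
  | succ m ih =>
    intro t s wc ht hlen
    have htl : 1 ≤ (t.length : Int) := by
      have : 0 < t.length := List.length_pos_iff.mpr ht
      omega
    rw [List.replicate_succ, List.cons_append, PySem.List.enumerate_cons, characGo,
        if_pos rfl, if_pos rfl]
    rw [if_neg (by push_cast at hlen ⊢; omega)]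
    have h1 : characGo len (PySem.List.enumerate (List.replicate m 'Z' ++ t) (s + 1))
        (wc ++ [Char.ofNat ('Z'.toNat - 25)]) ((s + 1) - 1)
        = characGo len (PySem.List.enumerate t ((s + 1) + m))
            ((wc ++ [Char.ofNat ('Z'.toNat - 25)]) ++ List.replicate m 'A') ((s + 1) + m - 1) :=
      ih t (s + 1) _ ht (by push_cast at hlen ⊢; omega)
    have hA : Char.ofNat ('Z'.toNat - 25) = 'A' := by decide
    simp only at h1 ⊢
    rw [show (s:Int) + 1 - 1 = s by omega] at h1
    rw [h1, hA]
    congr 1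
    · congr 1; push_cast; omega
    · simp [List.replicate_succ, List.append_assoc]
    · push_cast; omega

-- the input ends in a 'Z'-run reaching the end: each 'Z' → 'A' plus one extra 'A'
theorem go_allZ (len : Int) : ∀ (m : Nat) (s : Int) (wc : List Char), 1 ≤ m → s + m = len →
    characGo len (PySem.List.enumerate (List.replicate m 'Z') s) wc (s - 1)
      = wc ++ List.replicate (m + 1) 'A' := by
  intro m
  induction m with
  | zero => intro s wc h _; omega
  | succ m ih =>
    intro s wc _ hlen
    rw [List.replicate_succ, PySem.List.enumerate_cons, characGo, if_pos rfl, if_pos rfl]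
    have hA : Char.ofNat ('Z'.toNat - 25) = 'A' := by decide
    cases m with
    | zero =>
      rw [if_pos (by push_cast at hlen; omega)]
      simp [characGo]
    | succ m' =>
      rw [if_neg (by push_cast at hlen; omega)]
      have h1 := ih (s + 1) (wc ++ [Char.ofNat ('Z'.toNat - 25)]) (by omega)
        (by push_cast at hlen ⊢; omega)
      rw [show (s:Int) + 1 - 1 = s by omega] at h1
      rw [h1, hA]
      simp [List.replicate_succ, List.append_assoc]

theorem dropWhile_head_false (p : Char → Bool) : ∀ (l res : List Char) (c : Char),
    l.dropWhile p = c :: res → p c = false := by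
  intro l
  induction l with
  | nil => intro res c h; simp [List.dropWhile] at h
  | cons a as ih =>
    intro res c h
    rw [List.dropWhile_cons] at h
    split_ifs at h with hp
    · exact ih _ _ h
    · cases h; simpa using hp

theorem takeWhile_Z_eq_replicate (r : List Char) :
    r.takeWhile (· == 'Z') = List.replicate (r.takeWhile (· == 'Z')).length 'Z' := by
  rw [List.eq_replicate_iff]
  refine ⟨rfl, ?_⟩
  intro b hb
  simpa using List.mem_takeWhile_imp hb

-- ===== VERDICT (by name: the statement is the Claim_ definition above) =====
theorem charac_spec : Claim_equal_charac := by
  intro word _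
  unfold Spec_charac charac charac_alt
  dsimp only
  generalize word.toList = l
  have hsplit : l.reverse
      = List.replicate (l.reverse.takeWhile (· == 'Z')).length 'Z'
          ++ l.reverse.dropWhile (· == 'Z') := by
    conv_lhs => rw [← List.takeWhile_append_dropWhile (p := (· == 'Z')) (l := l.reverse)]
    rw [← takeWhile_Z_eq_replicate]
  cases hdt : List.dropWhile (fun x => x == 'Z') l.reverse with
  | nil =>
    rw [hdt] at hsplit
    rw [List.append_nil] at hsplit
    rw [List.reverse_nil, if_pos rfl]
    have hlm : l.length = (l.reverse.takeWhile (· == 'Z')).length := by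
      have := congrArg List.length hsplit
      simpa using this
    by_cases hl0 : l = []
    · rw [if_pos hl0]
      subst hl0
      simp only [List.reverse_nil, PySem.List.enumerate_nil, characGo]
      decide
    · rw [if_neg hl0]
      have hm1 : 1 ≤ (l.reverse.takeWhile (· == 'Z')).length := by
        rcases Nat.eq_zero_or_pos (l.reverse.takeWhile (· == 'Z')).length with h | h
        · exfalso
          rw [h, List.replicate_zero] at hsplit
          exact hl0 (by simpa using congrArg List.reverse hsplit)
        · omega
      rw [hsplit]
      have hgo := go_allZ ((List.replicate (l.reverse.takeWhile (· == 'Z')).length 'Z').length : Int)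
        (l.reverse.takeWhile (· == 'Z')).length 0 [] hm1 (by simp)
      rw [show (0:Int) - 1 = -1 by omega] at hgo
      rw [hgo, hlm]
      simp [List.reverse_replicate]
  | cons c rest =>
    rw [hdt] at hsplit
    have hcz : ¬ c = 'Z' := by
      simpa using dropWhile_head_false _ _ _ _ hdt
    have hll : l.length = (l.reverse.takeWhile (· == 'Z')).length + (rest.length + 1) := by
      have := congrArg List.length hsplit
      simpa using this
    rw [List.reverse_cons, if_neg (by simp)]
    rw [List.dropLast_concat, List.getLastD_concat]
    rw [hsplit]
    have hgo := go_zrun ((List.replicate (l.reverse.takeWhile (· == 'Z')).length 'Z'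
        ++ c :: rest).length : Int)
      (l.reverse.takeWhile (· == 'Z')).length (c :: rest) 0 [] (by simp)
      (by simp)
    rw [show (0:Int) - 1 = -1 by omega,
        show (0:Int) + ((l.reverse.takeWhile (· == 'Z')).length : Int)
          = ((l.reverse.takeWhile (· == 'Z')).length : Int) by omega] at hgo
    rw [hgo, go_nonZ _ c hcz rest _ _]
    have hk : l.length - (rest.reverse ++ [c]).length
        = (l.reverse.takeWhile (· == 'Z')).length := by
      simp [hll]
    rw [hk]
    simp [List.reverse_append, List.reverse_replicate]
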